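-- pv_equiv track=rewrite | github.com/Hemry81/rtxremix | lazy_USD_PointInstancer_Converter/omnipbr_mapping.py | _has_pbr_suffix
-- ===== SOURCE A (Python) =====
-- def _has_pbr_suffix(filename):
--     """Check if filename already has a PBR suffix"""
--     lower = filename.lower()
--     pbr_suffixes = ['_diffuse', '_albedo', '_basecolor', '_color',
--                     '_normal', '_norm', '_bump', '_height',
--                     '_roughness', '_rough', '_gloss', '_glossiness',
--                     '_metallic', '_metal', '_metalness',
--                     '_ao', '_occlusion', '_ambient',
--                     '_emissive', '_emission', '_glow',
--                     '_opacity', '_alpha', '_transparency']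
--     return any(lower.endswith(suffix) for suffix in pbr_suffixes)
-- ===== SOURCE B (Python) =====
-- _PBR_WORDS = {
--     'diffuse', 'albedo', 'basecolor', 'color',
--     'normal', 'norm', 'bump', 'height',
--     'roughness', 'rough', 'gloss', 'glossiness',
--     'metallic', 'metal', 'metalness',
--     'ao', 'occlusion', 'ambient',
--     'emissive', 'emission', 'glow',
--     'opacity', 'alpha', 'transparency',
-- }
--
--
-- def _has_pbr_suffix(filename):
--     """Check if filename already has a PBR suffix"""
--     lower = filename.lower()
--     idx = lower.rfind('_')
--     if idx == -1:
--         return False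
--     return lower[idx + 1:] in _PBR_WORDS
-- ===== Notes on version B (the rewrite author's own statement) =====
-- stated objective: idiomatic
-- what changed: Instead of testing the lowercased name with endswith against each of the 24 underscore-prefixed suffix strings, B finds the last underscore once with rfind and checks the trailing segment against a set of the bare suffix words.
import Mathlib
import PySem

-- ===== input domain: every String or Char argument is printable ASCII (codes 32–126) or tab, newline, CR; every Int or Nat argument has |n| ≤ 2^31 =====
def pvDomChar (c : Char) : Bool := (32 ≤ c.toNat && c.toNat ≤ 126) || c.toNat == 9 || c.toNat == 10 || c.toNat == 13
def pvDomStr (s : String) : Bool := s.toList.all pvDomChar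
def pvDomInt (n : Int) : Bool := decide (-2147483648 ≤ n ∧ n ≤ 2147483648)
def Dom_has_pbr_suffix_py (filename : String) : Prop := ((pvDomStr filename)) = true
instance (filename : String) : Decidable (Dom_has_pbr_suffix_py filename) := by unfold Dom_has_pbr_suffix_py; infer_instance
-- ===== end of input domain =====

-- B replaces A's scan over 24 endswith-tests by one rfind of the last underscore plus a single
-- set-membership test on the trailing segment (objective: idiomatic).


-- ===== PORT A =====
def has_pbr_suffix_py (filename : String) : Bool :=
  let lower := PySem.Str.lower filename
  let pbr_suffixes : List String :=
    ["_diffuse", "_albedo", "_basecolor", "_color",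
     "_normal", "_norm", "_bump", "_height",
     "_roughness", "_rough", "_gloss", "_glossiness",
     "_metallic", "_metal", "_metalness",
     "_ao", "_occlusion", "_ambient",
     "_emissive", "_emission", "_glow",
     "_opacity", "_alpha", "_transparency"]
  pbr_suffixes.any (fun suffix => PySem.Str.endswith lower suffix)

-- ===== PORT B =====
def pbrWords : PySem.Set String := PySem.Set.ofList
  ["diffuse", "albedo", "basecolor", "color",
   "normal", "norm", "bump", "height",
   "roughness", "rough", "gloss", "glossiness",
   "metallic", "metal", "metalness",
   "ao", "occlusion", "ambient",
   "emissive", "emission", "glow",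
   "opacity", "alpha", "transparency"]

def has_pbr_suffix_py_alt (filename : String) : Bool :=
  let lower := PySem.Str.lower filename
  let idx := PySem.Str.rfind lower "_"
  if idx == -1 then false
  else PySem.Set.contains pbrWords (PySem.Str.slice lower (some (idx + 1)) none)

-- ===== PRECONDITION & SPEC =====
def Spec_has_pbr_suffix_py (filename : String) (out : Bool) : Prop := out = has_pbr_suffix_py_alt filename
instance (filename : String) (out : Bool) : Decidable (Spec_has_pbr_suffix_py filename out) := by unfold Spec_has_pbr_suffix_py; infer_instance

-- ===== CLAIM =====
def Claim_equal_has_pbr_suffix_py : Prop := ∀ (filename : String), Dom_has_pbr_suffix_py filename → Spec_has_pbr_suffix_py filename (has_pbr_suffix_py filename)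

-- ===== LEMMAS AND PROOFS =====

lemma rfind_go_spec (l sub : List Char) (j : Nat) :
    (PySem.Chars.rfind.go l sub j = -1 ∧ ∀ k, k ≤ j → List.isPrefixOf sub (l.drop k) = false) ∨
    (∃ m : Nat, PySem.Chars.rfind.go l sub j = (m : Int) ∧ m ≤ j ∧
      List.isPrefixOf sub (l.drop m) = true ∧
      ∀ k, m < k → k ≤ j → List.isPrefixOf sub (l.drop k) = false) := by
  induction j with
  | zero =>
    have h0 : PySem.Chars.rfind.go l sub 0 = if List.isPrefixOf sub (l.drop 0) then (0 : Int) else -1 := rfl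
    by_cases h : List.isPrefixOf sub (l.drop 0)
    · right
      refine ⟨0, ?_, le_refl 0, by simpa using h, ?_⟩
      · rw [h0, if_pos h]; rfl
      · intro k hk hk'; omega
    · left
      constructor
      · rw [h0, if_neg h]
      · intro k hk
        have : k = 0 := by omega
        subst this
        exact Bool.eq_false_iff.mpr h
  | succ j ih =>
    have hS : PySem.Chars.rfind.go l sub (j+1) =
        if List.isPrefixOf sub (l.drop (j+1)) then ((j+1 : Nat) : Int) else PySem.Chars.rfind.go l sub j := rfl
    by_cases h : List.isPrefixOf sub (l.drop (j+1))
    · right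
      refine ⟨j+1, ?_, le_refl _, by simpa using h, ?_⟩
      · rw [hS, if_pos h]
      · intro k hk hk'; omega
    · rcases ih with ⟨h1, h2⟩ | ⟨m, h1, h2, h3, h4⟩
      · left
        refine ⟨?_, ?_⟩
        · rw [hS, if_neg h, h1]
        · intro k hk
          rcases Nat.lt_or_ge k (j+1) with hk' | hk'
          · exact h2 k (by omega)
          · have : k = j+1 := by omega
            subst this
            exact Bool.eq_false_iff.mpr h
      · right
        refine ⟨m, ?_, by omega, h3, ?_⟩
        · rw [hS, if_neg h, h1]
        · intro k hk hk'
          rcases Nat.lt_or_ge k (j+1) with hk'' | hk''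
          · exact h4 k hk (by omega)
          · have : k = j+1 := by omega
            subst this
            exact Bool.eq_false_iff.mpr h

lemma endswith_us_false (l : List Char)
    (hno : ∀ k, k ≤ l.length → List.isPrefixOf ['_'] (l.drop k) = false)
    (sfx w : List Char) (hsfx : sfx = '_' :: w) :
    PySem.Chars.endswith l sfx = false := by
  subst hsfx
  by_contra hne
  have h : ('_' :: w) <:+ l := by
    rw [← List.isSuffixOf_iff_suffix]
    simpa [PySem.Chars.endswith] using hne
  obtain ⟨p, hp⟩ := h
  have hdp : l.drop p.length = '_' :: w := by rw [← hp]; exact List.drop_left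
  have hlen : p.length ≤ l.length := by
    rw [← hp]; simp
  have := hno p.length hlen
  rw [hdp] at this
  simp [List.isPrefixOf] at this

lemma endswith_eq_beq (l seg : List Char) (m : Nat) (hm : l.drop m = '_' :: seg)
    (hlast : ∀ k, m < k → k ≤ l.length → List.isPrefixOf ['_'] (l.drop k) = false)
    (sfx w : List Char) (hsfx : sfx = '_' :: w) (hw : '_' ∉ w) :
    PySem.Chars.endswith l sfx = (seg == w) := by
  subst hsfx
  rw [Bool.eq_iff_iff]
  simp only [beq_iff_eq]
  constructor
  · intro hne
    have h : ('_' :: w) <:+ l := by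
      rw [← List.isSuffixOf_iff_suffix]
      simpa [PySem.Chars.endswith] using hne
    obtain ⟨p, hp⟩ := h
    have hdp : l.drop p.length = '_' :: w := by rw [← hp]; exact List.drop_left
    have hlen : p.length ≤ l.length := by rw [← hp]; simp
    have hple : p.length ≤ m := by
      by_contra hgt
      have := hlast p.length (by omega) hlen
      rw [hdp] at this
      simp [List.isPrefixOf] at this
    rcases Nat.eq_or_lt_of_le hple with heq | hlt
    · rw [heq, hm] at hdp
      exact ((List.cons.injEq _ _ _ _).mp hdp).2
    · -- p.length < m : then l[m] = '_' lies inside w, contradiction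
      exfalso
      have hm' : l[m]? = some '_' := by
        have : (l.drop m)[0]? = some '_' := by rw [hm]; rfl
        simpa [List.getElem?_drop] using this
      have : (p ++ '_' :: w)[m]? = some '_' := by rw [hp]; exact hm'
      rw [List.getElem?_append_right (by omega)] at this
      have hidx : m - p.length = (m - p.length - 1) + 1 := by omega
      rw [hidx] at this
      simp only [List.getElem?_cons_succ] at this
      exact hw (List.mem_of_getElem? this)
  · intro hse
    subst hse
    have : ('_' :: seg) <:+ l := hm ▸ List.drop_suffix m l
    simp [PySem.Chars.endswith, List.isSuffixOf_iff_suffix, this]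

lemma ofList_beq (cs : List Char) (s : String) : (String.ofList cs == s) = (cs == s.toList) := by
  rw [Bool.eq_iff_iff]; simp only [beq_iff_eq]
  constructor
  · rintro rfl; simp
  · rintro h; subst h; simp [String.ofList_toList]

-- ===== VERDICT =====
theorem has_pbr_suffix_py_spec : Claim_equal_has_pbr_suffix_py := by
  intro filename _
  unfold Spec_has_pbr_suffix_py has_pbr_suffix_py has_pbr_suffix_py_alt
  simp only [PySem.Str.endswith_eq, PySem.Str.rfind_eq, PySem.Str.toList_lower,
    List.any_cons, List.any_nil]
  set l : List Char := PySem.Chars.lower filename.toList with hl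
  have hsub : ("_" : String).toList = ['_'] := by decide
  rw [hsub]
  have hr : PySem.Chars.rfind l ['_'] = PySem.Chars.rfind.go l ['_'] l.length := rfl
  rcases rfind_go_spec l ['_'] l.length with ⟨h1, h2⟩ | ⟨m, h1, h2, h3, h4⟩
  · -- no underscore
    rw [hr, h1]
    simp only [BEq.rfl, if_pos]
    rw [endswith_us_false l h2 _ ("diffuse").toList (by decide),
        endswith_us_false l h2 _ ("albedo").toList (by decide),
        endswith_us_false l h2 _ ("basecolor").toList (by decide),
        endswith_us_false l h2 _ ("color").toList (by decide),
        endswith_us_false l h2 _ ("normal").toList (by decide),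
        endswith_us_false l h2 _ ("norm").toList (by decide),
        endswith_us_false l h2 _ ("bump").toList (by decide),
        endswith_us_false l h2 _ ("height").toList (by decide),
        endswith_us_false l h2 _ ("roughness").toList (by decide),
        endswith_us_false l h2 _ ("rough").toList (by decide),
        endswith_us_false l h2 _ ("gloss").toList (by decide),
        endswith_us_false l h2 _ ("glossiness").toList (by decide),
        endswith_us_false l h2 _ ("metallic").toList (by decide),
        endswith_us_false l h2 _ ("metal").toList (by decide),
        endswith_us_false l h2 _ ("metalness").toList (by decide),
        endswith_us_false l h2 _ ("ao").toList (by decide),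
        endswith_us_false l h2 _ ("occlusion").toList (by decide),
        endswith_us_false l h2 _ ("ambient").toList (by decide),
        endswith_us_false l h2 _ ("emissive").toList (by decide),
        endswith_us_false l h2 _ ("emission").toList (by decide),
        endswith_us_false l h2 _ ("glow").toList (by decide),
        endswith_us_false l h2 _ ("opacity").toList (by decide),
        endswith_us_false l h2 _ ("alpha").toList (by decide),
        endswith_us_false l h2 _ ("transparency").toList (by decide)]
    simp
  · -- underscore at position m
    rw [hr, h1]
    have hmne : (((m : Int)) == -1) = false := by
      simp only [beq_eq_false_iff_ne, ne_eq]
      omega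
    rw [hmne]
    simp only [Bool.false_eq_true, if_false]
    obtain ⟨t, ht⟩ : ∃ t, ['_'] ++ t = l.drop m :=
      List.isPrefixOf_iff_prefix.mp h3
    have hm : l.drop m = '_' :: t := ht.symm
    have hseg : l.drop (m + 1) = t := by
      rw [← List.tail_drop, hm]
      rfl
    rw [endswith_eq_beq l t m hm h4 _ ("diffuse").toList (by decide) (by decide),
        endswith_eq_beq l t m hm h4 _ ("albedo").toList (by decide) (by decide),
        endswith_eq_beq l t m hm h4 _ ("basecolor").toList (by decide) (by decide),
        endswith_eq_beq l t m hm h4 _ ("color").toList (by decide) (by decide),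
        endswith_eq_beq l t m hm h4 _ ("normal").toList (by decide) (by decide),
        endswith_eq_beq l t m hm h4 _ ("norm").toList (by decide) (by decide),
        endswith_eq_beq l t m hm h4 _ ("bump").toList (by decide) (by decide),
        endswith_eq_beq l t m hm h4 _ ("height").toList (by decide) (by decide),
        endswith_eq_beq l t m hm h4 _ ("roughness").toList (by decide) (by decide),
        endswith_eq_beq l t m hm h4 _ ("rough").toList (by decide) (by decide),
        endswith_eq_beq l t m hm h4 _ ("gloss").toList (by decide) (by decide),
        endswith_eq_beq l t m hm h4 _ ("glossiness").toList (by decide) (by decide),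
        endswith_eq_beq l t m hm h4 _ ("metallic").toList (by decide) (by decide),
        endswith_eq_beq l t m hm h4 _ ("metal").toList (by decide) (by decide),
        endswith_eq_beq l t m hm h4 _ ("metalness").toList (by decide) (by decide),
        endswith_eq_beq l t m hm h4 _ ("ao").toList (by decide) (by decide),
        endswith_eq_beq l t m hm h4 _ ("occlusion").toList (by decide) (by decide),
        endswith_eq_beq l t m hm h4 _ ("ambient").toList (by decide) (by decide),
        endswith_eq_beq l t m hm h4 _ ("emissive").toList (by decide) (by decide),
        endswith_eq_beq l t m hm h4 _ ("emission").toList (by decide) (by decide),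
        endswith_eq_beq l t m hm h4 _ ("glow").toList (by decide) (by decide),
        endswith_eq_beq l t m hm h4 _ ("opacity").toList (by decide) (by decide),
        endswith_eq_beq l t m hm h4 _ ("alpha").toList (by decide) (by decide),
        endswith_eq_beq l t m hm h4 _ ("transparency").toList (by decide) (by decide)]
    have hc : ((m : Int) + 1) = (((m + 1 : Nat) : Int)) := by push_cast; ring
    simp only [PySem.Str.slice, PySem.Chars.slice_eq_listSlice, PySem.Str.toList_lower]
    rw [hc, PySem.List.slice_from_natCast, hseg]
    have hpw : pbrWords = ["diffuse", "albedo", "basecolor", "color",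
      "normal", "norm", "bump", "height",
      "roughness", "rough", "gloss", "glossiness",
      "metallic", "metal", "metalness",
      "ao", "occlusion", "ambient",
      "emissive", "emission", "glow",
      "opacity", "alpha", "transparency"] := by decide
    rw [hpw]
    simp only [PySem.Set.contains, List.contains_eq_any_beq, List.any_cons, List.any_nil]
    simp only [ofList_beq]
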